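-- pv_equiv track=rewrite | github.com/mmarhin/advent-of-cordoba-gdg | challenges/week1/python/solution.py | count_vulnerable_sections
-- ===== SOURCE A (Python) =====
-- def count_vulnerable_sections(stabilities: list[int], security_threshold: int) -> int:
--     """
--     Calculates the total number of contiguous vulnerable voussoir sections in the Roman Bridge.
--
--     Args:
--         stabilities (list[int]): A list of integers representing the stability index of each voussoir.
--                                  Values range from 1 to 10.
--         security_threshold (int): An integer defining the security threshold.
--                                   A voussoir is vulnerable if its stability < security_threshold.
--
--     Returns:
--         int: The total number of vulnerable sections found.
--     """
--     # TODO: Write your code here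
--     if not stabilities:
--         return 0
--
--     sections = 0
--     in_vulnerable_section = False
--
--     for stability in stabilities:
--         is_vulnerable = stability < security_threshold
--
--         if is_vulnerable:
--             if not in_vulnerable_section:
--                 # Starting a new vulnerable section
--                 sections += 1
--                 in_vulnerable_section = True
--         else:
--             # Stable voussoir - ends any current vulnerable section
--             in_vulnerable_section = False
--
--     return sections
-- ===== SOURCE B (Python) =====
-- def count_vulnerable_sections(stabilities, security_threshold):
--     # Run-based decomposition: compute the vulnerability flag of every voussoir,
--     # keep one representative flag per maximal run of equal flags, count True runs.
--     flags = [s < security_threshold for s in stabilities]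
--     run_keys = [f for i, f in enumerate(flags) if i + 1 == len(flags) or flags[i + 1] != f]
--     return run_keys.count(True)
-- ===== Notes on version B (the rewrite author's own statement) =====
-- stated objective: idiomatic
-- what changed: B replaces A's stateful in_vulnerable_section flag machine with a run-based pass: it materializes the boolean vulnerability flags, collapses each maximal run of equal flags to one representative, and counts the True runs.
import Mathlib
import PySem

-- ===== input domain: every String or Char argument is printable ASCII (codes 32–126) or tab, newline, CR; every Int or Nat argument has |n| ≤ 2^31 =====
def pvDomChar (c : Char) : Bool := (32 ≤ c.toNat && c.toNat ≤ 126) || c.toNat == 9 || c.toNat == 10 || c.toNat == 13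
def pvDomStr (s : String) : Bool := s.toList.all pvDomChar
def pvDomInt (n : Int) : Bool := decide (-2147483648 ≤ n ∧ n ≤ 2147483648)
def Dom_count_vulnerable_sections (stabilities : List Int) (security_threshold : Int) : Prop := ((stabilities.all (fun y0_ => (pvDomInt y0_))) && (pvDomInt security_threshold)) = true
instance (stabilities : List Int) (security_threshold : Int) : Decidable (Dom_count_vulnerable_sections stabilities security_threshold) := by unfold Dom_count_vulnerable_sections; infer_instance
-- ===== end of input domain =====

-- B counts maximal runs of equal vulnerability flags (collapsing adjacent duplicates)
-- instead of A's stateful edge-flag scan; same O(n) cost, run-based decomposition.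


-- ===== PORT A =====
def pvCvsStep (t : Int) (st : Int × Bool) (s : Int) : Int × Bool :=
  let is_vulnerable := decide (s < t)
  if is_vulnerable then
    (if st.2 = false then (st.1 + 1, true) else st)
  else
    (st.1, false)

def count_vulnerable_sections (stabilities : List Int) (security_threshold : Int) : Int :=
  if stabilities = [] then 0
  else (stabilities.foldl (pvCvsStep security_threshold) (0, false)).1

-- ===== PORT B =====
-- one representative flag per maximal run of equal adjacent flags
def pvRunKeys : List Bool → List Bool
  | [] => []
  | [a] => [a]
  | a :: b :: rest => if a = b then pvRunKeys (b :: rest) else a :: pvRunKeys (b :: rest)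

def count_vulnerable_sections_alt (stabilities : List Int) (security_threshold : Int) : Int :=
  ((pvRunKeys (stabilities.map (fun s => decide (s < security_threshold)))).count true : Int)

-- ===== PRECONDITION & SPEC =====
def Spec_count_vulnerable_sections (stabilities : List Int) (security_threshold : Int) (out : Int) : Prop := out = count_vulnerable_sections_alt stabilities security_threshold
instance (stabilities : List Int) (security_threshold : Int) (out : Int) : Decidable (Spec_count_vulnerable_sections stabilities security_threshold out) := by unfold Spec_count_vulnerable_sections; infer_instance

-- ===== CLAIM (what is proved, stated in full; the proofs are below) =====
def Claim_equal_count_vulnerable_sections : Prop := ∀ (stabilities : List Int) (security_threshold : Int), Dom_count_vulnerable_sections stabilities security_threshold → Spec_count_vulnerable_sections stabilities security_threshold (count_vulnerable_sections stabilities security_threshold)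

-- ===== LEMMAS AND PROOFS =====

-- number of vulnerable runs in a flag list, given whether the previous flag was vulnerable
def pvR : List Bool → Bool → Int
  | [], _ => 0
  | b :: bs, flag => (if b && !flag then 1 else 0) + pvR bs b

theorem pvFold_eq_R : ∀ (bs : List Int) (t n : Int) (flag : Bool),
    (bs.foldl (pvCvsStep t) (n, flag)).1 = n + pvR (bs.map (fun s => decide (s < t))) flag := by
  intro bs
  induction bs with
  | nil => intro t n flag; simp [pvR]
  | cons s bs ih =>
    intro t n flag
    by_cases h : s < t
    · cases flag <;>
        simp [pvCvsStep, h, pvR, ih] <;> omega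
    · cases flag <;>
        simp [pvCvsStep, h, pvR, ih]

theorem pvRunKeys_count_eq_R : ∀ (bs : List Bool) (flag : Bool),
    ((pvRunKeys bs).count true : Int) = pvR bs flag + (if bs.headD false && flag then 1 else 0) := by
  intro bs
  induction bs with
  | nil => intro flag; simp [pvRunKeys, pvR]
  | cons a bs ih =>
    intro flag
    cases bs with
    | nil => cases a <;> cases flag <;> simp [pvRunKeys, pvR]
    | cons b rest =>
      have hb := ih a
      cases a <;> cases b <;> cases flag <;>
        simp [pvRunKeys, pvR, List.count_cons] at hb ⊢ <;> omega

-- ===== VERDICT (by name: the statement is the Claim_ definition above) =====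
theorem count_vulnerable_sections_spec : Claim_equal_count_vulnerable_sections := by
  intro stabilities t _
  unfold Spec_count_vulnerable_sections count_vulnerable_sections count_vulnerable_sections_alt
  by_cases h : stabilities = []
  · subst h; simp [pvRunKeys]
  · rw [if_neg h, pvFold_eq_R, pvRunKeys_count_eq_R (flag := false)]
    simp
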